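-- pv_equiv track=rewrite | github.com/1BrianHe1/kuairand | baseline/train_recall_content_twotower.py | _serialize_negative_history
-- ===== SOURCE A (Python) =====
-- from typing import Dict, List, Sequence
--
-- def _serialize_negative_history(
--     history: list[tuple[int, int, int]] | Sequence[tuple[int, int, int]],
--     max_history_len: int,
-- ) -> tuple[str, str, str, int]:
--     if max_history_len <= 0 or len(history) == 0:
--         return "", "", "", 0
--     selected: List[tuple[int, int, int]] = []
--     seen_video_ids: set[int] = set()
--     for video_id, event_time_ms, signal_type in reversed(history):
--         if int(video_id) in seen_video_ids:
--             continue
--         selected.append((int(video_id), int(event_time_ms), int(signal_type)))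
--         seen_video_ids.add(int(video_id))
--         if len(selected) >= max_history_len:
--             break
--     if not selected:
--         return "", "", "", 0
--     video_text = ",".join(str(video_id) for video_id, _, _ in selected)
--     signal_text = ",".join(str(signal_type) for _, _, signal_type in selected)
--     time_text = ",".join(str(event_time_ms) for _, event_time_ms, _ in selected)
--     return video_text, signal_text, time_text, len(selected)
-- ===== SOURCE B (Python) =====
-- def _serialize_negative_history(history, max_history_len):
--     if max_history_len <= 0 or len(history) == 0:
--         return "", "", "", 0
--     # Pass 1: count occurrences of each video id.
--     remaining = {}
--     for v, _, _ in history: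
--         v = int(v)
--         remaining[v] = remaining.get(v, 0) + 1
--     # Pass 2 (forward): keep an element iff it is the LAST occurrence of its id,
--     # detected as the remaining count reaching zero.
--     lasts = []
--     for v, t, s in history:
--         v = int(v)
--         c = remaining[v] - 1
--         remaining[v] = c
--         if c == 0:
--             lasts.append((v, int(t), int(s)))
--     sel = lasts[::-1][:max_history_len]
--     return (
--         ",".join(str(v) for v, _, _ in sel),
--         ",".join(str(s) for _, _, s in sel),
--         ",".join(str(t) for _, t, _ in sel),
--         len(sel),
--     )
-- ===== Notes on version B (the rewrite author's own statement) =====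
-- stated objective: alternative
-- what changed: Replaces A's reversed scan with a seen-set and early break by two forward passes: a counting dict over all ids, then a forward filter keeping each element exactly where its remaining count hits zero (its last occurrence), followed by reverse and truncate.
import Mathlib
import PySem

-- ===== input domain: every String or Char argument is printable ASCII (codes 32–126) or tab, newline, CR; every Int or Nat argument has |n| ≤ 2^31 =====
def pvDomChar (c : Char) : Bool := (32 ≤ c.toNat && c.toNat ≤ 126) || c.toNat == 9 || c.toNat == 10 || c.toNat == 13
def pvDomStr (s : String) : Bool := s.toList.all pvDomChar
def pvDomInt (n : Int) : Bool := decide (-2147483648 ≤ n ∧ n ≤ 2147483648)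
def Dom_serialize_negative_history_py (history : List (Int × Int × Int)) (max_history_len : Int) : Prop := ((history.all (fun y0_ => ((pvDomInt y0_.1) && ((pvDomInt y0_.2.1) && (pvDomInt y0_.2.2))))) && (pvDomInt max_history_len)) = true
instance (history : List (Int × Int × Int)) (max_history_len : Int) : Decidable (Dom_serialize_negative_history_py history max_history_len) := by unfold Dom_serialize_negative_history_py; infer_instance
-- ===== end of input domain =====

-- B replaces A's reversed scan with a seen-set and early break by two forward passes:
-- count occurrences per id, then keep each element exactly at its LAST occurrence
-- (remaining count hits zero), finally reverse and truncate; alternative structure, same values.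


-- ===== PORT A =====
-- the 'for … in reversed(history)' loop with 'continue' and 'break'
def pvALoop (m : Int) : List (Int × Int × Int) → List (Int × Int × Int) → PySem.Set Int → List (Int × Int × Int)
  | [], sel, _ => sel
  | (v, t, s) :: rest, sel, seen =>
    if PySem.Set.contains seen v then pvALoop m rest sel seen
    else
      let sel' := sel ++ [(v, t, s)]
      let seen' := PySem.Set.add seen v
      if m ≤ (sel'.length : Int) then sel'
      else pvALoop m rest sel' seen'

def serialize_negative_history_py (history : List (Int × Int × Int)) (max_history_len : Int) : String × String × String × Int :=
  if max_history_len ≤ 0 ∨ history.length = 0 then ("", "", "", 0)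
  else
    let selected := pvALoop max_history_len history.reverse [] PySem.Set.empty
    if selected = [] then ("", "", "", 0)
    else
      (PySem.Str.join "," (selected.map (fun x => PySem.Int.toStr x.1)),
       PySem.Str.join "," (selected.map (fun x => PySem.Int.toStr x.2.2)),
       PySem.Str.join "," (selected.map (fun x => PySem.Int.toStr x.2.1)),
       (selected.length : Int))

-- ===== PORT B =====
def serialize_negative_history_py_alt (history : List (Int × Int × Int)) (max_history_len : Int) : String × String × String × Int :=
  if max_history_len ≤ 0 ∨ history.length = 0 then ("", "", "", 0)
  else
    -- pass 1: remaining[v] = remaining.get(v, 0) + 1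
    let remaining := history.foldl
      (fun (d : PySem.Dict Int Int) x => d.insert x.1 (d.getD x.1 0 + 1)) PySem.Dict.empty
    -- pass 2: decrement; keep the element when its remaining count reaches zero
    let res := history.foldl
      (fun (st : PySem.Dict Int Int × List (Int × Int × Int)) x =>
        let c := st.1.getD x.1 0 - 1
        let rem' := st.1.insert x.1 c
        if c = 0 then (rem', st.2 ++ [x]) else (rem', st.2))
      (remaining, [])
    -- lasts[::-1][:max_history_len]   (xs[::-1] is List.reverse, cf. PySem.List.slice?_none_none_neg_one)
    let sel := PySem.List.slice res.2.reverse none (some max_history_len)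
    (PySem.Str.join "," (sel.map (fun x => PySem.Int.toStr x.1)),
     PySem.Str.join "," (sel.map (fun x => PySem.Int.toStr x.2.2)),
     PySem.Str.join "," (sel.map (fun x => PySem.Int.toStr x.2.1)),
     (sel.length : Int))

-- ===== PRECONDITION & SPEC =====
def Spec_serialize_negative_history_py (history : List (Int × Int × Int)) (max_history_len : Int) (out : String × String × String × Int) : Prop := out = serialize_negative_history_py_alt history max_history_len
instance (history : List (Int × Int × Int)) (max_history_len : Int) (out : String × String × String × Int) : Decidable (Spec_serialize_negative_history_py history max_history_len out) := by unfold Spec_serialize_negative_history_py; infer_instance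

-- ===== CLAIM (what is proved, stated in full; the proofs are below) =====
def Claim_equal_serialize_negative_history_py : Prop := ∀ (history : List (Int × Int × Int)) (max_history_len : Int), Dom_serialize_negative_history_py history max_history_len → Spec_serialize_negative_history_py history max_history_len (serialize_negative_history_py history max_history_len)

-- ===== LEMMAS AND PROOFS =====

-- common characterisation of A's loop: first occurrence per id, in traversal order
def pvDedup : List (Int × Int × Int) → List Int → List (Int × Int × Int)
  | [], _ => []
  | (v, t, s) :: rest, seen =>
    if v ∈ seen then pvDedup rest seen else (v, t, s) :: pvDedup rest (seen ++ [v])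

-- B's second pass keeps exactly the last occurrence of each id, in forward order
def pvLasts : List (Int × Int × Int) → List (Int × Int × Int)
  | [] => []
  | x :: rest => if x.1 ∈ rest.map (fun y => y.1) then pvLasts rest else x :: pvLasts rest

theorem pvALoop_eq (m : Int) (xs : List (Int × Int × Int)) :
    ∀ (sel : List (Int × Int × Int)) (seen : List Int), (sel.length : Int) < m →
      pvALoop m xs sel seen = sel ++ (pvDedup xs seen).take (m - sel.length).toNat := by
  induction xs with
  | nil => intro sel seen _; simp [pvALoop, pvDedup]
  | cons x rest ih =>
    obtain ⟨v, t, s⟩ := x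
    intro sel seen hlt
    by_cases hv : v ∈ seen
    · simp [pvALoop, pvDedup, PySem.Set.contains, hv, ih sel seen hlt]
    · simp only [pvALoop, pvDedup, PySem.Set.contains, PySem.Set.add, List.contains_eq_mem,
        hv, decide_false, Bool.false_eq_true, if_false]
      by_cases hbreak : m ≤ ((sel ++ [(v, t, s)]).length : Int)
      · rw [if_pos hbreak]
        have h1 : (m - sel.length).toNat = 1 := by
          simp only [List.length_append, List.length_cons, List.length_nil] at hbreak; omega
        simp [h1]
      · rw [if_neg hbreak]
        have hlt' : ((sel ++ [(v, t, s)]).length : Int) < m := by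
          simp only [not_le] at hbreak; exact hbreak
        rw [ih (sel ++ [(v, t, s)]) (seen ++ [v]) hlt']
        have h2 : (m - sel.length).toNat = (m - (sel ++ [(v, t, s)]).length).toNat + 1 := by
          simp only [List.length_append, List.length_cons, List.length_nil] at hlt' ⊢
          omega
        simp [h2]

theorem pvDedup_append (x : Int × Int × Int) (as : List (Int × Int × Int)) :
    ∀ seen : List Int, pvDedup (as ++ [x]) seen
      = pvDedup as seen ++ (if x.1 ∈ seen ∨ x.1 ∈ as.map (fun y => y.1) then [] else [x]) := by
  induction as with
  | nil =>
    intro seen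
    obtain ⟨v, t, s⟩ := x
    by_cases hv : v ∈ seen <;> simp [pvDedup, hv]
  | cons a rest ih =>
    intro seen
    obtain ⟨w, t', s'⟩ := a
    simp only [List.cons_append, pvDedup]
    by_cases hw : w ∈ seen
    · rw [if_pos hw, if_pos hw, ih seen]
      have hiff : (x.1 ∈ seen ∨ x.1 ∈ List.map (fun y => y.1) rest) ↔
          (x.1 ∈ seen ∨ x.1 ∈ List.map (fun y => y.1) ((w, t', s') :: rest)) := by
        simp only [List.map_cons, List.mem_cons]
        constructor
        · tauto
        · rintro (h | h | h)
          exacts [Or.inl h, Or.inl (h ▸ hw), Or.inr h]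
      rw [if_congr hiff rfl rfl]
    · rw [if_neg hw, if_neg hw, ih (seen ++ [w])]
      simp only [List.cons_append]
      have hiff : (x.1 ∈ seen ++ [w] ∨ x.1 ∈ List.map (fun y => y.1) rest) ↔
          (x.1 ∈ seen ∨ x.1 ∈ List.map (fun y => y.1) ((w, t', s') :: rest)) := by
        simp only [List.mem_append, List.map_cons, List.mem_cons]
        tauto
      rw [if_congr hiff rfl rfl]

theorem pvLasts_reverse (xs : List (Int × Int × Int)) :
    (pvLasts xs).reverse = pvDedup xs.reverse [] := by
  induction xs with
  | nil => simp [pvLasts, pvDedup]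
  | cons x rest ih =>
    have h := pvDedup_append x rest.reverse ([] : List Int)
    simp only [List.reverse_cons, h, List.mem_nil_iff, false_or, List.map_reverse,
      List.mem_reverse] at *
    by_cases hx : x.1 ∈ rest.map (fun y => y.1)
    · simp [pvLasts, hx, ih]
    · simp [pvLasts, hx, ih]

theorem pvCount_fold (xs : List (Int × Int × Int)) :
    ∀ (d : PySem.Dict Int Int) (v : Int),
      (xs.foldl (fun (d : PySem.Dict Int Int) x => d.insert x.1 (d.getD x.1 0 + 1)) d).getD v 0
        = d.getD v 0 + ((xs.map (fun y => y.1)).count v : Int) := by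
  induction xs with
  | nil => intro d v; simp
  | cons x rest ih =>
    intro d v
    simp only [List.foldl_cons, ih, PySem.Dict.getD_insert, List.map_cons, List.count_cons]
    by_cases h : v = x.1
    · rw [if_pos h]
      simp [h]
      ring
    · rw [if_neg h]
      have h' : ¬ x.1 = v := fun hh => h hh.symm
      simp [h']

theorem pvBLoop_eq (ys : List (Int × Int × Int)) :
    ∀ (rem : PySem.Dict Int Int) (acc : List (Int × Int × Int)),
      (∀ v : Int, rem.getD v 0 = ((ys.map (fun y => y.1)).count v : Int)) →
      (ys.foldl
        (fun (st : PySem.Dict Int Int × List (Int × Int × Int)) x =>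
          let c := st.1.getD x.1 0 - 1
          let rem' := st.1.insert x.1 c
          if c = 0 then (rem', st.2 ++ [x]) else (rem', st.2))
        (rem, acc)).2 = acc ++ pvLasts ys := by
  induction ys with
  | nil => intro rem acc _; simp [pvLasts]
  | cons x rest ih =>
    intro rem acc hinv
    have hc : rem.getD x.1 0 - 1 = ((rest.map (fun y => y.1)).count x.1 : Int) := by
      have := hinv x.1
      simp only [List.map_cons, List.count_cons_self] at this
      omega
    have hinv' : ∀ v : Int, (rem.insert x.1 (rem.getD x.1 0 - 1)).getD v 0
        = ((rest.map (fun y => y.1)).count v : Int) := by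
      intro v
      rw [PySem.Dict.getD_insert]
      by_cases hv : v = x.1
      · simp [hv, hc]
      · rw [if_neg hv, hinv v]
        have hv' : ¬ x.1 = v := fun h => hv h.symm
        simp [hv']
    by_cases hmem : x.1 ∈ rest.map (fun y => y.1)
    · have hcne : rem.getD x.1 0 - 1 ≠ 0 := by
        rw [hc]
        have : (rest.map (fun y => y.1)).count x.1 ≠ 0 := by
          simpa [List.count_eq_zero] using hmem
        exact_mod_cast this
      simp only [List.foldl_cons, hcne, if_false]
      rw [ih _ acc hinv']
      simp [pvLasts, hmem]
    · have hcz : rem.getD x.1 0 - 1 = 0 := by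
        rw [hc]
        have : (rest.map (fun y => y.1)).count x.1 = 0 := List.count_eq_zero.mpr hmem
        simp [this]
      simp only [List.foldl_cons, hcz, if_true]
      rw [ih _ (acc ++ [x]) (by simpa [hcz] using hinv')]
      simp [pvLasts, hmem]

-- ===== VERDICT =====
theorem serialize_negative_history_py_spec : Claim_equal_serialize_negative_history_py := by
  intro history m _
  unfold Spec_serialize_negative_history_py serialize_negative_history_py serialize_negative_history_py_alt
  by_cases hguard : m ≤ 0 ∨ history.length = 0
  · rw [if_pos hguard, if_pos hguard]
  · rw [if_neg hguard, if_neg hguard]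
    push Not at hguard
    obtain ⟨hm, hne⟩ := hguard
    have hm' : 0 < m := by omega
    obtain ⟨k, rfl⟩ : ∃ k : Nat, m = (k : Int) := ⟨m.toNat, by omega⟩
    have hhist : history ≠ [] := by intro h; exact hne (by simp [h])
    -- A's selected list
    have hA := pvALoop_eq (k : Int) history.reverse [] PySem.Set.empty (by exact_mod_cast hm')
    have hsel : pvALoop (k : Int) history.reverse [] PySem.Set.empty
        = (pvDedup history.reverse PySem.Set.empty).take k := by
      rw [hA]; simp
    -- B's counting pass
    have hcount : ∀ v : Int,
        (history.foldl (fun (d : PySem.Dict Int Int) x => d.insert x.1 (d.getD x.1 0 + 1))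
          PySem.Dict.empty).getD v 0 = ((history.map (fun y => y.1)).count v : Int) := by
      intro v
      rw [pvCount_fold]
      simp
    -- B's filtering pass
    have hB := pvBLoop_eq history _ [] hcount
    have hBsel : PySem.List.slice
        ((history.foldl
          (fun (st : PySem.Dict Int Int × List (Int × Int × Int)) x =>
            let c := st.1.getD x.1 0 - 1
            let rem' := st.1.insert x.1 c
            if c = 0 then (rem', st.2 ++ [x]) else (rem', st.2))
          (history.foldl (fun (d : PySem.Dict Int Int) x => d.insert x.1 (d.getD x.1 0 + 1))
            PySem.Dict.empty, [])).2.reverse) none (some (k : Int))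
        = (pvDedup history.reverse PySem.Set.empty).take k := by
      rw [hB]
      simp only [List.nil_append]
      rw [PySem.List.slice_to_natCast, pvLasts_reverse]
      rfl
    have hrevne : history.reverse ≠ [] := by simpa using hhist
    obtain ⟨⟨v, t, s⟩, rest, hrev⟩ := List.exists_cons_of_ne_nil hrevne
    have hselne : pvALoop (k : Int) history.reverse [] PySem.Set.empty ≠ [] := by
      rw [hsel, hrev]
      have hk : k ≠ 0 := by omega
      obtain ⟨j, rfl⟩ := Nat.exists_eq_succ_of_ne_zero hk
      simp [pvDedup, PySem.Set.empty]
    rw [if_neg hselne, hsel]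
    simp only [hBsel]
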